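-- pv_equiv track=rewrite | github.com/salustiana/rpc | rlp.py | rlp_encode
-- ===== SOURCE A (Python) =====
-- def to_binary(x: int) -> str:
--     if x == 0:
--         return ""
--     return to_binary(int(x / 256)) + chr(x % 256)
--
-- def encode_length(l: int, offset: int) -> str:
--     if l < 56:
--         return chr(l + offset)
--     if l < 2**64:
--         bl = to_binary(l)
--         return chr(len(bl) + offset + 55) + bl
--     raise Exception(f"object too long")
--
-- def rlp_encode(obj) -> str:
--     if type(obj) == int:
--         if obj < 0x80:
--             return chr(obj)
--         # convert to string and fallthrough
--         obj = str(obj)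
--
--     if type(obj) == str:
--         if len(obj) == 1 and ord(obj) < 0x80:
--             return obj
--         return encode_length(len(obj), 0x80) + obj
--
--     if type(obj) == list:
--         output = "".join(rlp_encode(o) for o in obj)
--         return encode_length(len(output), 0xc0) + output
--     raise Exception("invalid type")
-- ===== SOURCE B (Python) =====
-- def _with_header(payload: str, offset: int) -> str:
--     l = len(payload)
--     if l < 56:
--         return chr(l + offset) + payload
--     if l >= 2**64:
--         raise Exception(f"object too long")
--     be = ""
--     while l:
--         be = chr(l % 256) + be
--         l //= 256
--     return chr(len(be) + offset + 55) + be + payload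
--
-- def _encode_str(s: str) -> str:
--     if len(s) == 1 and ord(s) < 0x80:
--         return s
--     return _with_header(s, 0x80)
--
-- def rlp_encode(obj) -> str:
--     if type(obj) == int:
--         return chr(obj) if obj < 0x80 else _encode_str(str(obj))
--     if type(obj) == str:
--         return _encode_str(obj)
--     if type(obj) == list:
--         return _with_header("".join(map(rlp_encode, obj)), 0xc0)
--     raise Exception("invalid type")
-- ===== Notes on version B (the rewrite author's own statement) =====
-- stated objective: alternative
-- what changed: to_binary's recursion is replaced by an iterative big-endian accumulator loop, encode_length is inlined into a _with_header helper that attaches the header directly to the payload, and the per-element encoding is factored through _encode_str and map instead of recursive re-dispatch.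
import Mathlib
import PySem

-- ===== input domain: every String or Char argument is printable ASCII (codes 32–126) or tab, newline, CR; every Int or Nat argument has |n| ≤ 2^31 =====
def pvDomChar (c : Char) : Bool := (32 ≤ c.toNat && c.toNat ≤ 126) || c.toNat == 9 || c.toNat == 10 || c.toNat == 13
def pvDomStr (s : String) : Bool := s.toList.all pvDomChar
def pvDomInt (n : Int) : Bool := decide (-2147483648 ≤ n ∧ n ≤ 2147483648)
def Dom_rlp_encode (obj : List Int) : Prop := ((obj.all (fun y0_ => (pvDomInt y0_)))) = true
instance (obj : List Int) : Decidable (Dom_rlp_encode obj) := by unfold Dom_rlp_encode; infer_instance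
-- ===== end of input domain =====

-- B replaces to_binary's recursion by an iterative accumulator loop and inlines encode_length
-- into a header-attaching helper; same outputs and exceptions (alternative decomposition, no speed claim).

-- ===== PORT A =====
-- to_binary: `int(x / 256)` truncates toward zero = Int.tdiv; exact for |x| < 2^53 (float
-- scaling by 256 is exact there), which covers every argument reachable from a runnable input.
def toBinaryA (x : Int) : List Char :=
  if x = 0 then []
  else toBinaryA (x.tdiv 256) ++ [Char.ofNat (PySem.Int.mod x 256).toNat]
termination_by x.natAbs
decreasing_by
  have : (x.tdiv 256).natAbs = x.natAbs / 256 := Int.natAbs_tdiv x 256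
  omega

def encodeLengthA (l offset : Int) : List Char :=
  if l < 56 then [Char.ofNat (l + offset).toNat]
  else if l < 2 ^ 64 then
    let bl := toBinaryA l
    Char.ofNat ((bl.length : Int) + offset + 55).toNat :: bl
  else []  -- Python: raise Exception("object too long"); unreachable from any feasible input

-- A's rlp_encode on one int element (the int branch falling through to the str branch);
-- chr(o) for o < 0 raises ValueError in Python — excluded by Pre_rlp_encode.
def rlpItemA (o : Int) : List Char :=
  if o < 0x80 then [Char.ofNat o.toNat]
  else
    let s := PySem.Int.toChars o  -- str(obj)
    if s.length = 1 ∧ (s.getD 0 ' ').toNat < 0x80 then s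
    else encodeLengthA (s.length : Int) 0x80 ++ s

def rlp_encode (obj : List Int) : String :=
  let output := (obj.map rlpItemA).flatten  -- "".join(rlp_encode(o) for o in obj)
  String.ofList (encodeLengthA (output.length : Int) 0xc0 ++ output)

-- ===== PORT B =====
-- the `while l: be = chr(l % 256) + be; l //= 256` loop; the l ≤ 0 guard only makes the
-- loop total in Lean (it is only ever entered with l ≥ 56).
def beLoopB (l : Int) (acc : List Char) : List Char :=
  if l ≤ 0 then acc
  else beLoopB (PySem.Int.floordiv l 256) (Char.ofNat (PySem.Int.mod l 256).toNat :: acc)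
termination_by l.toNat
decreasing_by
  have := PySem.Int.floordiv_eq_ediv_of_pos (a := l) (b := 256) (by omega)
  omega

def withHeaderB (payload : List Char) (offset : Int) : List Char :=
  let l : Int := (payload.length : Int)
  if l < 56 then Char.ofNat (l + offset).toNat :: payload
  else if l ≥ 2 ^ 64 then payload  -- Python: raise Exception("object too long"); unreachable
  else
    let be := beLoopB l []
    Char.ofNat ((be.length : Int) + offset + 55).toNat :: (be ++ payload)

def encodeStrB (s : List Char) : List Char :=
  if s.length = 1 ∧ (s.getD 0 ' ').toNat < 0x80 then s
  else withHeaderB s 0x80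

def rlpItemB (o : Int) : List Char :=
  if o < 0x80 then [Char.ofNat o.toNat] else encodeStrB (PySem.Int.toChars o)

def rlp_encode_alt (obj : List Int) : String :=
  String.ofList (withHeaderB ((obj.map rlpItemB).flatten) 0xc0)

-- ===== PRECONDITION & SPEC =====
-- Pre_ excludes negative elements: on them Python A raises ValueError in chr() (B raises too).
def Pre_rlp_encode (obj : List Int) : Prop := (obj.all (fun o => decide (0 ≤ o))) = true
instance (obj : List Int) : Decidable (Pre_rlp_encode obj) := by unfold Pre_rlp_encode; infer_instance
def pvWitness_rlp_encode : List Int := [0, 5, 127, 128, 1000]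

def Spec_rlp_encode (obj : List Int) (out : String) : Prop := out = rlp_encode_alt obj
instance (obj : List Int) (out : String) : Decidable (Spec_rlp_encode obj out) := by unfold Spec_rlp_encode; infer_instance

-- ===== CLAIM (what is proved, stated in full; the proofs are below) =====
def Claim_equal_rlp_encode : Prop := ∀ (obj : List Int), Dom_rlp_encode obj → Pre_rlp_encode obj → Spec_rlp_encode obj (rlp_encode obj)

-- ===== LEMMAS AND PROOFS =====

-- B's accumulator loop computes A's recursive to_binary (for the nonnegative lengths it sees).
theorem beLoopB_eq (l : Int) (acc : List Char) (h : 0 ≤ l) :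
    beLoopB l acc = toBinaryA l ++ acc := by
  by_cases h0 : l = 0
  · subst h0; rw [beLoopB, toBinaryA]; simp
  · have hpos : 0 < l := by omega
    have hlt : (PySem.Int.floordiv l 256).toNat < l.toNat := by
      have := PySem.Int.floordiv_eq_ediv_of_pos (a := l) (b := 256) (by omega)
      omega
    rw [beLoopB, toBinaryA]
    have hdiv : l.tdiv 256 = PySem.Int.floordiv l 256 := by
      have := PySem.Int.floordiv_eq_ediv_of_pos (a := l) (b := 256) (by omega)
      rw [this, Int.tdiv_eq_ediv_of_nonneg h]
    simp only [if_neg (by omega : ¬ l ≤ 0), if_neg h0, hdiv]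
    rw [beLoopB_eq (PySem.Int.floordiv l 256) _ (by
      have := PySem.Int.floordiv_eq_ediv_of_pos (a := l) (b := 256) (by omega); omega)]
    simp
termination_by l.toNat
decreasing_by
  have := PySem.Int.floordiv_eq_ediv_of_pos (a := l) (b := 256) (by omega)
  omega

theorem withHeaderB_eq (s : List Char) (offset : Int) :
    withHeaderB s offset = encodeLengthA (s.length : Int) offset ++ s := by
  unfold withHeaderB encodeLengthA
  by_cases h1 : (s.length : Int) < 56
  · simp [h1]
  · by_cases h2 : (s.length : Int) < 2 ^ 64
    · simp only [if_neg h1, if_pos h2, ge_iff_le, if_neg (by omega : ¬ (2:Int) ^ 64 ≤ (s.length : Int))]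
      rw [beLoopB_eq _ _ (by positivity)]
      simp
    · simp only [if_neg h1, if_neg h2, ge_iff_le, if_pos (by omega : (2:Int) ^ 64 ≤ (s.length : Int))]
      simp

theorem rlpItem_eq (o : Int) : rlpItemA o = rlpItemB o := by
  unfold rlpItemA rlpItemB encodeStrB
  by_cases h1 : o < 0x80
  · simp [h1]
  · simp only [if_neg h1]
    by_cases h2 : (PySem.Int.toChars o).length = 1 ∧ ((PySem.Int.toChars o).getD 0 ' ').toNat < 0x80
    · obtain ⟨hl, _⟩ := h2
      split_ifs <;> simp [withHeaderB_eq, hl]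
    · simp [withHeaderB_eq]

-- ===== VERDICT (by name: the statement is the Claim_ definition above) =====
theorem rlp_encode_spec : Claim_equal_rlp_encode := by
  intro obj _ _
  unfold Spec_rlp_encode rlp_encode rlp_encode_alt
  have : obj.map rlpItemA = obj.map rlpItemB := List.map_congr_left (fun o _ => rlpItem_eq o)
  rw [this, withHeaderB_eq]
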